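-- pv_equiv track=rewrite | github.com/enthought/distarray | distarray/utils.py | create_factors
-- ===== SOURCE A (Python) =====
-- def divisors(n):
--     i = 2
--     while i<n:
--         if n % i == 0:
--             yield i
--         i += 1
--
-- def multi_for(iterables):
--     if not iterables:
--         yield ()
--     else:
--         for item in iterables[0]:
--             for rest_tuple in multi_for(iterables[1:]):
--                 yield (item,) + rest_tuple
--
-- def create_factors(n, size=2):
--     divs = list(divisors(n))
--     factors = []
--     for indices in multi_for( [range(p) for p in size*[len(divs)]] ):
--         total = 1
--         for i in indices:
--             total = total*divs[i]
--         if n == total: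
--             factor = [divs[i] for i in indices]
--             factor.sort()
--             factor = tuple(factor)
--             if factor not in factors:
--                 factors.append(factor)
--     return factors
-- ===== SOURCE B (Python) =====
-- def create_factors(n, size=2):
--     divs = [i for i in range(2, n) if n % i == 0]
--
--     def rec(k, start, prod):
--         # non-decreasing divisor tuples d_start<=... whose product times prod equals n
--         if k <= 0:
--             return [()] if prod == n else []
--         out = []
--         for j in range(start, len(divs)):
--             d = divs[j]
--             if n % (prod * d) == 0:
--                 out.extend((d,) + rest for rest in rec(k - 1, j, prod * d))
--         return out
--
--     return rec(size, 0, 1)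
-- ===== Notes on version B (the rewrite author's own statement) =====
-- stated objective: alternative
-- what changed: Replaces the exhaustive scan of all len(divs)^size index tuples with sort-and-dedup by a recursive search that extends only non-decreasing divisor prefixes whose running product divides n, emitting each factorization once in the same order.
import Mathlib
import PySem

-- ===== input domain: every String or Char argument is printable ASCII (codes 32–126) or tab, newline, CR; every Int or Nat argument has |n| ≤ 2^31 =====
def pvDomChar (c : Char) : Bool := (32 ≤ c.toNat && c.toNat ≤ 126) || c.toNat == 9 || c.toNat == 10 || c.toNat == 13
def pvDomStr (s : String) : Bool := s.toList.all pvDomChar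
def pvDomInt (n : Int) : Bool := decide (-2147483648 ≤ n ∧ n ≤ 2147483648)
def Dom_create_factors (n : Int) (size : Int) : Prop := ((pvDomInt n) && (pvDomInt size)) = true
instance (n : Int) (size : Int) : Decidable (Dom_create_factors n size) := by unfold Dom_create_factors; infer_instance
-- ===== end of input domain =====

-- B replaces A's exhaustive scan of all len(divs)^size index tuples (sort + dedup each hit)
-- by a recursive search extending only non-decreasing divisor prefixes whose running product
-- divides n; objective: alternative (no sort, no dedup, no full cartesian product), same return value.


-- ===== PORT A =====
-- divisors(n): the proper divisors 2 <= i < n of n, in increasing order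
-- (the while-loop generator is ported as the equivalent filtered range walk)
def pvDivs (n : Int) : List Int :=
  (PySem.List.pyRange 2 n 1).filter (fun i => PySem.Int.mod n i == 0)

-- multi_for(iterables): cartesian product of the given lists, lexicographic order
def pvMultiFor : List (List Int) → List (List Int)
  | [] => [[]]
  | l :: ls => l.flatMap (fun item => (pvMultiFor ls).map (fun rest => item :: rest))

def create_factors (n : Int) (size : Int) : List (List Int) :=
  let divs := pvDivs n
  let tuples := pvMultiFor (List.replicate size.toNat (PySem.List.pyRange 0 (divs.length : Int) 1))
  tuples.foldl (fun factors indices =>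
    let total := indices.foldl (fun t i => t * PySem.List.pyGetD divs i 0) 1
    if n == total then
      let factor := PySem.List.sorted (indices.map (fun i => PySem.List.pyGetD divs i 0)) (fun x => x) false
      if factor ∈ factors then factors else factors ++ [factor]
    else factors) []

-- ===== PORT B =====
-- rec(k, start, prod) of Source B; the Python counter k with its 'k <= 0' base case is ported
-- as the Nat fuel k (the caller passes size.toNat, exact for every Int size)
def pvRecB (n : Int) (divs : List Int) : Nat → Int → Int → List (List Int)
  | 0, _, prod => if prod == n then [[]] else []
  | (k+1), start, prod =>
      (PySem.List.pyRange start (divs.length : Int) 1).foldl (fun out j =>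
        let d := PySem.List.pyGetD divs j 0
        if PySem.Int.mod n (prod * d) == 0 then
          out ++ (pvRecB n divs k j (prod * d)).map (fun rest => d :: rest)
        else out) []

def create_factors_alt (n : Int) (size : Int) : List (List Int) :=
  let divs := pvDivs n
  pvRecB n divs size.toNat 0 1

-- ===== PRECONDITION & SPEC =====
def Spec_create_factors (n : Int) (size : Int) (out : List (List Int)) : Prop := out = create_factors_alt n size
instance (n : Int) (size : Int) (out : List (List Int)) : Decidable (Spec_create_factors n size out) := by unfold Spec_create_factors; infer_instance

-- ===== CLAIM (what is proved, stated in full; the proofs are below) =====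
def Claim_equal_create_factors : Prop := ∀ (n : Int) (size : Int), Dom_create_factors n size → Spec_create_factors n size (create_factors n size)

-- ===== LEMMAS AND PROOFS =====

-- The canonical enumeration both programs compute: non-decreasing tuples of k divisors
-- drawn from the suffix ds, with accumulated product prod, leaves kept iff the product is n.
def pvC (n : Int) : Nat → List Int → Int → List (List Int)
  | 0, _, prod => if prod == n then [[]] else []
  | _+1, [], _ => []
  | k+1, d :: ds, prod => ((pvC n k (d :: ds) (prod * d)).map (d :: ·)) ++ pvC n (k+1) ds prod

-- pvC with B's divisibility pruning
def pvCP (n : Int) : Nat → List Int → Int → List (List Int)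
  | 0, _, prod => if prod == n then [[]] else []
  | _+1, [], _ => []
  | k+1, d :: ds, prod =>
      (if PySem.Int.mod n (prod * d) == 0 then (pvCP n k (d :: ds) (prod * d)).map (d :: ·) else []) ++
      pvCP n (k+1) ds prod

-- first-occurrence dedup accumulator (the shape of A's inner if/append)
def pvInsDedup (acc l : List (List Int)) : List (List Int) :=
  l.foldl (fun a y => if y ∈ a then a else a ++ [y]) acc

-- value list of an index tuple
def pvVals (divs : List Int) (t : List Int) : List Int :=
  t.map (fun i => PySem.List.pyGetD divs i 0)

-- abbreviation for Python's sorted(x)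
def pvSort (x : List Int) : List Int := PySem.List.sorted x (fun e => e) false

theorem pvDivs_pairwise (n : Int) : (pvDivs n).Pairwise (· < ·) := by
  exact (PySem.List.pairwise_lt_pyRange_one 2 n).filter _

theorem pvMultiFor_mem (L : List Int) (k : Nat) (t : List Int) :
    t ∈ pvMultiFor (List.replicate k L) ↔ t.length = k ∧ ∀ i ∈ t, i ∈ L := by
  induction k generalizing t with
  | zero =>
    simp only [List.replicate_zero, pvMultiFor, List.mem_singleton, List.length_eq_zero_iff]
    constructor
    · rintro rfl; simp
    · rintro ⟨rfl, _⟩; rfl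
  | succ k ih =>
    simp only [List.replicate_succ, pvMultiFor, List.mem_flatMap, List.mem_map]
    constructor
    · rintro ⟨a, ha, r, hr, rfl⟩
      obtain ⟨hl, hm⟩ := (ih r).mp hr
      refine ⟨by simp [hl], ?_⟩
      intro i hi
      rcases List.mem_cons.mp hi with rfl | hi
      · exact ha
      · exact hm i hi
    · rintro ⟨hl, hm⟩
      cases t with
      | nil => simp at hl
      | cons a r =>
        exact ⟨a, hm a (by simp), r,
          (ih r).mpr ⟨by simpa using hl, fun i hi => hm i (List.mem_cons_of_mem _ hi)⟩, rfl⟩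

theorem pvMultiFor_pairwise_aux (T : List (List Int)) (hT : T.Pairwise (List.Lex (· < ·))) :
    ∀ (L : List Int), L.Pairwise (· < ·) →
      (L.flatMap (fun a => T.map (a :: ·))).Pairwise (List.Lex (· < ·)) := by
  intro L
  induction L with
  | nil => intro _; simp
  | cons a L' ih =>
    intro hL
    rw [List.flatMap_cons]
    refine List.pairwise_append.mpr ⟨?_, ih (List.Pairwise.of_cons hL), ?_⟩
    · exact List.pairwise_map.mpr (hT.imp (fun h => List.Lex.cons h))
    · rintro x hx y hy
      obtain ⟨r, _, rfl⟩ := List.mem_map.mp hx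
      obtain ⟨b, hb, r', _, rfl⟩ := by
        simpa only [List.mem_flatMap, List.mem_map] using hy
      exact List.Lex.rel ((List.pairwise_cons.mp hL).1 b hb)

theorem pvMultiFor_pairwise (L : List Int) (k : Nat) (hL : L.Pairwise (· < ·)) :
    (pvMultiFor (List.replicate k L)).Pairwise (List.Lex (· < ·)) := by
  induction k with
  | zero => simp [pvMultiFor]
  | succ k ih =>
    rw [List.replicate_succ, pvMultiFor]
    exact pvMultiFor_pairwise_aux _ ih L hL

theorem pvSorted_lex_min (u t : List Int) (hp : t.Perm u) (hs : u.Pairwise (· ≤ ·)) :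
    ¬ List.Lex (· < ·) t u := by
  induction u generalizing t with
  | nil => intro hlex; cases hlex
  | cons a u' ih =>
    intro hlex
    cases hlex with
    | nil => simpa using hp.length_eq
    | cons h =>
      exact ih _ (hp.cons_inv) (List.Pairwise.of_cons hs) h
    | rel h =>
      rename_i b t'
      have hb : b ∈ a :: u' := hp.mem_iff.mp (List.mem_cons_self ..)
      rcases List.mem_cons.mp hb with rfl | hb
      · exact lt_irrefl _ h
      · have := (List.pairwise_cons.mp hs).1 b hb
        omega

theorem pvStrict_ext (l l' : List (List Int))
    (h : l.Pairwise (List.Lex (· < ·))) (h' : l'.Pairwise (List.Lex (· < ·)))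
    (hm : ∀ x, x ∈ l ↔ x ∈ l') : l = l' := by
  induction l generalizing l' with
  | nil =>
    cases l' with
    | nil => rfl
    | cons b t' => exact absurd ((hm b).mpr (List.mem_cons_self ..)) (by simp)
  | cons a t ih =>
    cases l' with
    | nil => exact absurd ((hm a).mp (List.mem_cons_self ..)) (by simp)
    | cons b t' =>
      have hirr : ∀ x : List Int, ¬ List.Lex (· < ·) x x := fun x => Std.Irrefl.irrefl x
      have hab : a = b := by
        by_contra hne
        rcases List.mem_cons.mp ((hm a).mp (List.mem_cons_self ..)) with h1 | h1
        · exact hne h1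
        · have hba : List.Lex (· < ·) b a := (List.pairwise_cons.mp h').1 a h1
          rcases List.mem_cons.mp ((hm b).mpr (List.mem_cons_self ..)) with h2 | h2
          · exact hne h2.symm
          · have hab' : List.Lex (· < ·) a b := (List.pairwise_cons.mp h).1 b h2
            exact hirr a (List.lt_trans hab' hba)
      subst hab
      have : t = t' := by
        apply ih t' (List.Pairwise.of_cons h) (List.Pairwise.of_cons h')
        intro x
        constructor
        · intro hx
          rcases List.mem_cons.mp ((hm x).mp (List.mem_cons_of_mem _ hx)) with rfl | hx'
          · exact absurd ((List.pairwise_cons.mp h).1 x hx) (hirr x)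
          · exact hx'
        · intro hx
          rcases List.mem_cons.mp ((hm x).mpr (List.mem_cons_of_mem _ hx)) with rfl | hx'
          · exact absurd ((List.pairwise_cons.mp h').1 x hx) (hirr x)
          · exact hx'
      rw [this]

theorem pvC_eq_nil_of_not_dvd (n : Int) (k : Nat) (ds : List Int) (prod : Int)
    (h : ¬ prod ∣ n) : pvC n k ds prod = [] := by
  induction k, ds, prod using pvC.induct n with
  | case1 ds prod hbeq =>
    exact absurd (dvd_of_eq (eq_of_beq hbeq)) h
  | case2 ds prod hbeq => simp [pvC, hbeq]
  | case3 k prod => rw [pvC]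
  | case4 k d ds prod ih1 ih2 =>
    rw [pvC, ih1 (fun hd => h (dvd_trans (dvd_mul_right prod d) hd)), ih2 h]
    simp

theorem pvCP_eq_pvC (n : Int) (k : Nat) (ds : List Int) (prod : Int) :
    pvCP n k ds prod = pvC n k ds prod := by
  induction k, ds, prod using pvC.induct n with
  | case1 ds prod hbeq => rw [pvCP, pvC]
  | case2 ds prod hbeq => rw [pvCP, pvC]
  | case3 k prod => rw [pvCP, pvC]
  | case4 k d ds prod ih1 ih2 =>
    rw [pvCP, pvC, ih2]
    by_cases hdvd : (prod * d) ∣ n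
    · rw [if_pos (by simpa [PySem.Int.mod_eq_zero_iff_dvd] using hdvd), ih1]
    · rw [if_neg (by simpa [PySem.Int.mod_eq_zero_iff_dvd] using hdvd),
        pvC_eq_nil_of_not_dvd n k (d :: ds) (prod * d) hdvd]
      simp

theorem pvC_mem (n : Int) (k : Nat) (ds : List Int) (prod : Int) (x : List Int)
    (hds : ds.Pairwise (· < ·)) :
    x ∈ pvC n k ds prod ↔
      x.length = k ∧ (∀ e ∈ x, e ∈ ds) ∧ x.Pairwise (· ≤ ·) ∧ prod * x.prod = n := by
  induction k, ds, prod using pvC.induct n generalizing x with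
  | case1 ds prod hbeq =>
    have : prod = n := eq_of_beq hbeq
    subst this
    simp only [pvC, if_pos (by simp : (prod == prod) = true)]
    constructor
    · rintro hx
      simp only [List.mem_singleton] at hx
      subst hx
      simp
    · rintro ⟨hl, _, _, _⟩
      simp [List.length_eq_zero_iff.mp hl]
  | case2 ds prod hbeq =>
    simp only [pvC, if_neg hbeq, List.not_mem_nil, false_iff]
    rintro ⟨hl, _, _, hprod⟩
    rw [List.length_eq_zero_iff.mp hl] at hprod
    simp at hprod
    exact hbeq (by simp [hprod])
  | case3 k prod =>
    simp only [pvC, List.not_mem_nil, false_iff]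
    rintro ⟨hl, hel, _, _⟩
    cases x with
    | nil => simp at hl
    | cons e r => exact absurd (hel e (List.mem_cons_self ..)) (by simp)
  | case4 k d ds prod ih1 ih2 =>
    have hd_lt : ∀ e ∈ ds, d < e := (List.pairwise_cons.mp hds).1
    have hds' : ds.Pairwise (· < ·) := List.Pairwise.of_cons hds
    rw [pvC]
    simp only [List.mem_append, List.mem_map]
    constructor
    · rintro (⟨r, hr, rfl⟩ | hx)
      · obtain ⟨hlen, helem, hpw, hprod⟩ := (ih1 r hds).mp hr
        refine ⟨by simp [hlen], ?_, ?_, ?_⟩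
        · intro e he
          rcases List.mem_cons.mp he with rfl | he
          · exact List.mem_cons_self ..
          · exact helem e he
        · refine List.pairwise_cons.mpr ⟨?_, hpw⟩
          intro e he
          rcases List.mem_cons.mp (helem e he) with rfl | he'
          · exact le_refl _
          · exact le_of_lt (hd_lt e he')
        · rw [List.prod_cons, ← mul_assoc]; exact hprod
      · obtain ⟨hlen, helem, hpw, hprod⟩ := (ih2 x hds').mp hx
        exact ⟨hlen, fun e he => List.mem_cons_of_mem _ (helem e he), hpw, hprod⟩
    · rintro ⟨hlen, helem, hpw, hprod⟩
      cases x with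
      | nil => simp at hlen
      | cons e r =>
        rcases List.mem_cons.mp (helem e (List.mem_cons_self ..)) with rfl | he
        · left
          refine ⟨r, (ih1 r hds).mpr ⟨by simpa using hlen, ?_, List.Pairwise.of_cons hpw, ?_⟩, rfl⟩
          · exact fun f hf => helem f (List.mem_cons_of_mem _ hf)
          · rw [mul_assoc, ← List.prod_cons]; exact hprod
        · right
          refine (ih2 _ hds').mpr ⟨hlen, ?_, hpw, hprod⟩
          intro f hf
          rcases List.mem_cons.mp hf with rfl | hf'
          · exact he
          · rcases List.mem_cons.mp (helem f (List.mem_cons_of_mem _ hf')) with rfl | hf''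
            · have h1 : e ≤ f := (List.pairwise_cons.mp hpw).1 f hf'
              have h2 : f < e := hd_lt e he
              omega
            · exact hf''

theorem pvC_pairwise (n : Int) (k : Nat) (ds : List Int) (prod : Int)
    (hds : ds.Pairwise (· < ·)) :
    (pvC n k ds prod).Pairwise (List.Lex (· < ·)) := by
  induction k, ds, prod using pvC.induct n with
  | case1 ds prod hbeq => simp [pvC, hbeq]
  | case2 ds prod hbeq => simp [pvC, hbeq]
  | case3 k prod => simp [pvC]
  | case4 k d ds prod ih1 ih2 =>
    have hd_lt : ∀ e ∈ ds, d < e := (List.pairwise_cons.mp hds).1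
    have hds' : ds.Pairwise (· < ·) := List.Pairwise.of_cons hds
    rw [pvC]
    refine List.pairwise_append.mpr ⟨?_, ih2 hds', ?_⟩
    · refine List.pairwise_map.mpr ?_
      exact (ih1 hds).imp (fun h => List.Lex.cons h)
    · rintro a ha b hb
      obtain ⟨r, _, rfl⟩ := List.mem_map.mp ha
      obtain ⟨hlen, helem, _, _⟩ := (pvC_mem n (k+1) ds prod b hds').mp hb
      cases b with
      | nil => simp at hlen
      | cons e r' =>
        exact List.Lex.rel (hd_lt e (helem e (List.mem_cons_self ..)))

theorem pvGet_lt (divs : List Int) (hpw : divs.Pairwise (· < ·)) (i j : Int)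
    (h0 : 0 ≤ i) (hij : i < j) (hj : j < (divs.length : Int)) :
    PySem.List.pyGetD divs i 0 < PySem.List.pyGetD divs j 0 := by
  rw [PySem.List.pyGetD_eq_getElem divs 0 h0 (by omega),
      PySem.List.pyGetD_eq_getElem divs 0 (by omega) hj]
  exact List.pairwise_iff_getElem.mp hpw i.toNat j.toNat (by omega) (by omega) (by omega)

theorem pvGet_le (divs : List Int) (hpw : divs.Pairwise (· < ·)) (i j : Int)
    (h0 : 0 ≤ i) (hij : i ≤ j) (hj : j < (divs.length : Int)) :
    PySem.List.pyGetD divs i 0 ≤ PySem.List.pyGetD divs j 0 := by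
  rcases lt_or_eq_of_le hij with h | h
  · exact le_of_lt (pvGet_lt divs hpw i j h0 h hj)
  · rw [h]

theorem pvVals_lex_mono (divs : List Int) (hpw : divs.Pairwise (· < ·)) (t u : List Int)
    (h : List.Lex (· < ·) t u)
    (ht : ∀ i ∈ t, 0 ≤ i ∧ i < (divs.length : Int))
    (hu : ∀ i ∈ u, 0 ≤ i ∧ i < (divs.length : Int)) :
    List.Lex (· < ·) (pvVals divs t) (pvVals divs u) := by
  induction h with
  | nil => exact List.Lex.nil
  | @cons a l1 l2 h ih =>
    refine List.Lex.cons (ih ?_ ?_)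
    · exact fun i hi => ht i (List.mem_cons_of_mem _ hi)
    · exact fun i hi => hu i (List.mem_cons_of_mem _ hi)
  | @rel a1 l1 a2 l2 h =>
    refine List.Lex.rel ?_
    exact pvGet_lt divs hpw a1 a2 (ht a1 (List.mem_cons_self ..)).1 h
      (hu a2 (List.mem_cons_self ..)).2

theorem pvVals_pairwise_le (divs : List Int) (hpw : divs.Pairwise (· < ·)) (t : List Int)
    (hpt : t.Pairwise (· ≤ ·)) (ht : ∀ i ∈ t, 0 ≤ i ∧ i < (divs.length : Int)) :
    (pvVals divs t).Pairwise (· ≤ ·) := by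
  refine List.pairwise_map.mpr ?_
  refine hpt.imp_of_mem ?_
  intro a b ha hb hab
  exact pvGet_le divs hpw a b (ht a ha).1 hab (ht b hb).2

theorem pvSort_vals_comm (divs : List Int) (hpw : divs.Pairwise (· < ·)) (t : List Int)
    (ht : ∀ i ∈ t, 0 ≤ i ∧ i < (divs.length : Int)) :
    pvSort (pvVals divs t) = pvVals divs (pvSort t) := by
  apply PySem.List.sorted_id_eq_of_perm_of_pairwise
  · exact List.Perm.map _ (PySem.List.sorted_perm t (fun e => e) false)
  · refine pvVals_pairwise_le divs hpw _ ?_ ?_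
    · simpa using PySem.List.sorted_pairwise t (fun e => e)
    · intro i hi
      exact ht i ((PySem.List.mem_sorted t _ false i).mp hi)

theorem pvSort_fixed_iff (x : List Int) : pvSort x = x ↔ x.Pairwise (· ≤ ·) := by
  constructor
  · intro h
    have := PySem.List.sorted_pairwise x (fun e => e)
    rw [pvSort] at h
    simpa [h] using this
  · intro h
    exact PySem.List.sorted_eq_self_of_pairwise x _ (by simpa using h)

theorem pvInsDedup_cons (acc : List (List Int)) (y : List Int) (l : List (List Int)) :
    pvInsDedup acc (y :: l) = if y ∈ acc then pvInsDedup acc l else pvInsDedup (acc ++ [y]) l := by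
  simp only [pvInsDedup, List.foldl_cons]
  split <;> rfl

theorem pvDedup_main (s : List Int → List Int)
    (P L : List (List Int))
    (hpw : (P ++ L).Pairwise (List.Lex (· < ·)))
    (hclosed : ∀ x ∈ P ++ L, s x ∈ P ++ L)
    (hmin : ∀ x ∈ P ++ L, ¬ List.Lex (· < ·) x (s x))
    (hidem : ∀ x ∈ P ++ L, s (s x) = s x) :
    pvInsDedup (P.filter (fun x => s x == x)) (L.map s) =
      P.filter (fun x => s x == x) ++ L.filter (fun x => s x == x) := by
  induction L generalizing P with
  | nil => simp [pvInsDedup]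
  | cons x L' ih =>
    have hassoc : (P ++ [x]) ++ L' = P ++ x :: L' := by simp
    rw [List.map_cons, pvInsDedup_cons]
    by_cases hx : s x = x
    · have hxnotin : x ∉ P.filter (fun z => s z == z) := by
        intro hmem
        have hxP : x ∈ P := List.mem_of_mem_filter hmem
        have := (List.pairwise_append.mp hpw).2.2 x hxP x (List.mem_cons_self ..)
        exact Std.Irrefl.irrefl x this
      rw [hx, if_neg hxnotin]
      have hacc : (P ++ [x]).filter (fun z => s z == z) = P.filter (fun z => s z == z) ++ [x] := by
        rw [List.filter_append]; simp [hx]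
      have := ih (P ++ [x]) (by rw [hassoc]; exact hpw) (by rw [hassoc]; exact hclosed)
        (by rw [hassoc]; exact hmin) (by rw [hassoc]; exact hidem)
      rw [hacc] at this
      rw [this, List.filter_cons]
      simp [hx]
    · have hsxP : s x ∈ P.filter (fun z => s z == z) := by
        have hsxM : s x ∈ P ++ x :: L' := hclosed x (by simp)
        rcases List.mem_append.mp hsxM with hP | hXL
        · exact List.mem_filter.mpr ⟨hP, by simp [hidem x (by simp)]⟩
        · rcases List.mem_cons.mp hXL with heq | hL'
          · exact absurd heq hx
          · have hpw2 := (List.pairwise_append.mp hpw).2.1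
            have hlex : List.Lex (· < ·) x (s x) := (List.pairwise_cons.mp hpw2).1 _ hL'
            exact absurd hlex (hmin x (by simp))
      rw [if_pos hsxP]
      have hacc : (P ++ [x]).filter (fun z => s z == z) = P.filter (fun z => s z == z) := by
        rw [List.filter_append]; simp [hx]
      have := ih (P ++ [x]) (by rw [hassoc]; exact hpw) (by rw [hassoc]; exact hclosed)
        (by rw [hassoc]; exact hmin) (by rw [hassoc]; exact hidem)
      rw [hacc] at this
      rw [this, List.filter_cons]
      simp [hx]

theorem pvFlat (n : Int) (divs : List Int) (k : Nat)
    (ih : ∀ (s : Nat) (prod : Int), pvRecB n divs k (s:Int) prod = pvCP n k (divs.drop s) prod) :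
    ∀ (c s : Nat), divs.length - s ≤ c → ∀ prod : Int,
    ((PySem.List.pyRange (s:Int) (divs.length : Int) 1).flatMap
      (fun j => if PySem.Int.mod n (prod * PySem.List.pyGetD divs j 0) == 0
        then (pvRecB n divs k j (prod * PySem.List.pyGetD divs j 0)).map
          (fun rest => PySem.List.pyGetD divs j 0 :: rest) else []))
    = pvCP n (k+1) (divs.drop s) prod := by
  intro c
  induction c with
  | zero =>
    intro s hs prod
    have hle : divs.length ≤ s := by omega
    rw [PySem.List.pyRange_one_eq_nil (by exact_mod_cast hle), List.drop_eq_nil_of_le hle]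
    rw [pvCP]
    rfl
  | succ c ihc =>
    intro s hs prod
    by_cases hlt : s < divs.length
    · rw [PySem.List.pyRange_one_cons (by exact_mod_cast hlt), List.flatMap_cons]
      have hdrop : divs.drop s = divs[s] :: divs.drop (s+1) := List.drop_eq_getElem_cons hlt
      have hget : PySem.List.pyGetD divs (s:Int) 0 = divs[s] := by
        rw [PySem.List.pyGetD_natCast, List.getD_eq_getElem divs 0 hlt]
      have hcast : ((s:Int)+1) = ((s+1 : Nat) : Int) := by push_cast; ring
      rw [hcast, ihc (s+1) (by omega) prod, hget, ih s (prod * divs[s]), hdrop, pvCP]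
    · have hle : divs.length ≤ s := by omega
      rw [PySem.List.pyRange_one_eq_nil (by exact_mod_cast hle), List.drop_eq_nil_of_le hle]
      rw [pvCP]
      rfl

theorem pvRecB_eq_pvCP (n : Int) (divs : List Int) (k : Nat) :
    ∀ (s : Nat) (prod : Int), pvRecB n divs k (s : Int) prod = pvCP n k (divs.drop s) prod := by
  induction k with
  | zero =>
    intro s prod
    rw [pvRecB, pvCP]
  | succ k ih =>
    intro s prod
    rw [pvRecB]
    rw [PySem.List.foldl_congr_mem _ _
      (fun out j => out ++ (if PySem.Int.mod n (prod * PySem.List.pyGetD divs j 0) == 0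
        then (pvRecB n divs k j (prod * PySem.List.pyGetD divs j 0)).map
          (fun rest => PySem.List.pyGetD divs j 0 :: rest) else [])) _
      (by
        intro acc j hj
        by_cases h : PySem.Int.mod n (prod * PySem.List.pyGetD divs j 0) == 0 <;>
          simp [h])]
    rw [PySem.List.foldl_append_eq_flatMap]
    rw [List.nil_append]
    exact pvFlat n divs k ih (divs.length - s) s (le_refl _) prod

theorem pvFoldA (n : Int) (divs : List Int) (k : Nat) (hpw : divs.Pairwise (· < ·)) :
    (pvMultiFor (List.replicate k (PySem.List.pyRange 0 (divs.length : Int) 1))).foldl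
      (fun factors indices =>
        let total := indices.foldl (fun t i => t * PySem.List.pyGetD divs i 0) 1
        if n == total then
          let factor := PySem.List.sorted (indices.map (fun i => PySem.List.pyGetD divs i 0)) (fun x => x) false
          if factor ∈ factors then factors else factors ++ [factor]
        else factors) []
    = pvC n k divs 1 := by
  have htot : ∀ t : List Int,
      List.foldl (fun a i => a * PySem.List.pyGetD divs i 0) 1 t = (pvVals divs t).prod := by
    intro t
    rw [pvVals, List.prod_eq_foldl, List.foldl_map]
  set T := pvMultiFor (List.replicate k (PySem.List.pyRange 0 (divs.length : Int) 1)) with hTdef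
  have hTfact : ∀ t ∈ T, t.length = k ∧ ∀ i ∈ t, 0 ≤ i ∧ i < (divs.length : Int) := by
    intro t ht
    obtain ⟨hl, hm⟩ := (pvMultiFor_mem _ k t).mp ht
    exact ⟨hl, fun i hi => PySem.List.mem_pyRange_one.mp (hm i hi)⟩
  rw [PySem.List.foldl_congr_mem _ _
      (fun factors indices =>
        if (n == (pvVals divs indices).prod) then
          (if pvSort (pvVals divs indices) ∈ factors then factors
           else factors ++ [pvSort (pvVals divs indices)])
        else factors) []
      (by
        intro acc t _
        simp only [htot, pvSort, pvVals])]
  rw [PySem.List.foldl_if_eq_foldl_filter (fun indices => n == (pvVals divs indices).prod)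
      (fun factors indices =>
        if pvSort (pvVals divs indices) ∈ factors then factors
        else factors ++ [pvSort (pvVals divs indices)])]
  set p : List Int → Bool := fun indices => n == (pvVals divs indices).prod with hpdef
  set M := (T.filter p).map (pvVals divs) with hMdef
  have hfoldM : (T.filter p).foldl
      (fun factors indices =>
        if pvSort (pvVals divs indices) ∈ factors then factors
        else factors ++ [pvSort (pvVals divs indices)]) [] = pvInsDedup [] (M.map pvSort) := by
    rw [pvInsDedup, hMdef, List.map_map, List.foldl_map]
    rfl
  have hMchar : ∀ x, x ∈ M ↔ ∃ t, (t ∈ T ∧ p t = true) ∧ pvVals divs t = x := by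
    intro x
    rw [hMdef]
    simp [List.mem_map, List.mem_filter]
  have hTpw : T.Pairwise (List.Lex (· < ·)) :=
    pvMultiFor_pairwise _ k (PySem.List.pairwise_lt_pyRange_one 0 _)
  have hMpw : M.Pairwise (List.Lex (· < ·)) := by
    refine List.pairwise_map.mpr ((hTpw.filter p).imp_of_mem ?_)
    intro a b ha hb hab
    exact pvVals_lex_mono divs hpw a b hab
      (fun i hi => (hTfact a (List.mem_of_mem_filter ha)).2 i hi)
      (fun i hi => (hTfact b (List.mem_of_mem_filter hb)).2 i hi)
  have hMclosed : ∀ x ∈ M, pvSort x ∈ M := by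
    intro x hx
    obtain ⟨t, ⟨hTt, hpt⟩, rfl⟩ := (hMchar x).mp hx
    have hent := (hTfact t hTt).2
    rw [pvSort_vals_comm divs hpw t hent]
    apply (hMchar _).mpr
    refine ⟨pvSort t, ⟨?_, ?_⟩, rfl⟩
    · apply (pvMultiFor_mem _ k _).mpr
      constructor
      · rw [pvSort, PySem.List.length_sorted]
        exact (hTfact t hTt).1
      · intro i hi
        have hit : i ∈ t := (PySem.List.mem_sorted t _ false i).mp hi
        exact ((pvMultiFor_mem _ k t).mp hTt).2 i hit
    · have hperm : (pvVals divs (pvSort t)).Perm (pvVals divs t) :=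
        List.Perm.map _ (PySem.List.sorted_perm t (fun e => e) false)
      show (n == (pvVals divs (pvSort t)).prod) = true
      rw [hperm.prod_eq]
      exact hpt
  have hMmin : ∀ x ∈ M, ¬ List.Lex (· < ·) x (pvSort x) := by
    intro x _
    exact pvSorted_lex_min (pvSort x) x (PySem.List.sorted_perm x (fun e => e) false).symm
      (by simpa using PySem.List.sorted_pairwise x (fun e => e))
  have hMidem : ∀ x ∈ M, pvSort (pvSort x) = pvSort x := by
    intro x _
    exact PySem.List.sorted_sorted x (fun e => e)
  have hdd := pvDedup_main pvSort [] M (by simpa using hMpw) (by simpa using hMclosed)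
    (by simpa using hMmin) (by simpa using hMidem)
  simp only [List.filter_nil, List.nil_append] at hdd
  rw [hfoldM, hdd]
  -- finally: the fixed points of M are exactly pvC n k divs 1
  apply pvStrict_ext
  · exact hMpw.filter _
  · exact pvC_pairwise n k divs 1 hpw
  · intro x
    rw [pvC_mem n k divs 1 x hpw, List.mem_filter]
    constructor
    · rintro ⟨hxM, hfix⟩
      obtain ⟨t, ⟨hTt, hpt⟩, rfl⟩ := (hMchar _).mp hxM
      have hent := (hTfact t hTt).2
      refine ⟨?_, ?_, ?_, ?_⟩
      · rw [pvVals, List.length_map]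
        exact (hTfact t hTt).1
      · intro e he
        obtain ⟨i, hi, rfl⟩ := List.mem_map.mp he
        rw [PySem.List.pyGetD_eq_getElem divs 0 (hent i hi).1 (hent i hi).2]
        exact List.getElem_mem _
      · exact (pvSort_fixed_iff _).mp (by simpa using hfix)
      · rw [one_mul]
        exact (eq_of_beq hpt).symm
    · rintro ⟨hlen, helem, hpx, hprod⟩
      rw [one_mul] at hprod
      have hsort : pvSort x = x := (pvSort_fixed_iff x).mpr hpx
      have hvals : pvVals divs (x.map (fun e => ((divs.idxOf e : Nat) : Int))) = x := by
        rw [pvVals, List.map_map]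
        have hpt : ∀ e ∈ x, PySem.List.pyGetD divs ((divs.idxOf e : Nat) : Int) 0 = e := by
          intro e he
          have hm' := List.idxOf_lt_length_of_mem (helem e he)
          rw [PySem.List.pyGetD_natCast, List.getD_eq_getElem divs 0 hm']
          exact List.getElem_idxOf hm'
        calc x.map _ = x.map id := List.map_congr_left (fun e he => hpt e he)
          _ = x := List.map_id x
      refine ⟨?_, by simp [hsort]⟩
      apply (hMchar x).mpr
      refine ⟨x.map (fun e => ((divs.idxOf e : Nat) : Int)), ⟨?_, ?_⟩, hvals⟩
      · apply (pvMultiFor_mem _ k _).mpr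
        refine ⟨by simpa using hlen, ?_⟩
        intro i hi
        obtain ⟨e, he, rfl⟩ := List.mem_map.mp hi
        rw [PySem.List.mem_pyRange_one]
        have hm' := List.idxOf_lt_length_of_mem (helem e he)
        exact ⟨Int.natCast_nonneg _, by exact_mod_cast hm'⟩
      · show (n == (pvVals divs _).prod) = true
        rw [hvals]
        exact beq_iff_eq.mpr hprod.symm

theorem createA_eq_pvC (n : Int) (size : Int) :
    create_factors n size = pvC n size.toNat (pvDivs n) 1 := by
  simp only [create_factors]
  exact pvFoldA n (pvDivs n) size.toNat (pvDivs_pairwise n)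

theorem createB_eq_pvC (n : Int) (size : Int) :
    create_factors_alt n size = pvC n size.toNat (pvDivs n) 1 := by
  show pvRecB n (pvDivs n) size.toNat ((0 : Nat) : Int) 1 = _
  rw [pvRecB_eq_pvCP n (pvDivs n) size.toNat 0 1, List.drop_zero, pvCP_eq_pvC]

-- ===== VERDICT (by name: the statement is the Claim_ definition above) =====
theorem create_factors_spec : Claim_equal_create_factors := by
  intro n size _
  unfold Spec_create_factors
  rw [createA_eq_pvC, createB_eq_pvC]
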